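-- pv_equiv track=rewrite | github.com/daniel-reich/ubiquitous-fiesta | zp64GNJQpZyGpYWL8_13.py | score_it
-- ===== SOURCE A (Python) =====
-- def score_it(s):
--     result, prod, number = 0, 0, ""
--     for i in s:
--         if not i.isnumeric():
--             if number != "":
--                 result += prod*int(number)
--                 number = ""
--         prod += (i == "(") - (i == ")")
--         number += i if i.isnumeric() else ""
--     return result
-- ===== SOURCE B (Python) =====
-- def score_it(s):
--     # Run-based scan: jump over each maximal digit run at once instead of
--     # growing a character accumulator; a trailing run (no following char) is skipped.
--     result = 0
--     depth = 0
--     i = 0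
--     n = len(s)
--     while i < n:
--         c = s[i]
--         if c.isnumeric():
--             j = i
--             while j < n and s[j].isnumeric():
--                 j += 1
--             if j < n:
--                 result += depth * int(s[i:j])
--             i = j
--         else:
--             if c == '(':
--                 depth += 1
--             elif c == ')':
--                 depth -= 1
--             i += 1
--     return result
-- ===== Notes on version B (the rewrite author's own statement) =====
-- stated objective: alternative
-- what changed: Replaces A's per-character fold that grows a pending digit-string accumulator with a run-based index scan that jumps over each maximal digit run at once and scores it only when a character follows it.
import Mathlib
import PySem

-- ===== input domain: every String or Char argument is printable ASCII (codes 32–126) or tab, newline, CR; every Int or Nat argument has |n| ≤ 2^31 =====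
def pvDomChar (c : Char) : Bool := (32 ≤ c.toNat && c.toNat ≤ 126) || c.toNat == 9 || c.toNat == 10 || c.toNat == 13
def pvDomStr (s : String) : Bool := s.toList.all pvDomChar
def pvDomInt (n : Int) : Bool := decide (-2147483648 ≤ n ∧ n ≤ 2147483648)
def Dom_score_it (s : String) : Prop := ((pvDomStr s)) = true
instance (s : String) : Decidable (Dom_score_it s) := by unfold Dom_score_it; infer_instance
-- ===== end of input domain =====

-- B is a run-based scan (jumps over each maximal digit run) instead of A's
-- per-character fold with a pending digit accumulator; same O(n) cost.

-- ===== PORT A =====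
-- state: (result, prod, number); int(number) as PySem.Int.ofChars? (always some on the
-- admitted ASCII domain, since number is a nonempty digit run there)
def scoreItStep (st : Int × Int × List Char) (i : Char) : Int × Int × List Char :=
  let result := st.1
  let prod := st.2.1
  let number := st.2.2
  let (result, number) :=
    if ¬ PySem.Chars.isdigit i then
      if number ≠ [] then (result + prod * (PySem.Int.ofChars? number).getD 0, ([] : List Char))
      else (result, number)
    else (result, number)
  let prod := prod + ((if i = '(' then (1 : Int) else 0) - (if i = ')' then (1 : Int) else 0))
  let number := number ++ (if PySem.Chars.isdigit i then [i] else [])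
  (result, prod, number)

def score_it (s : String) : Int :=
  (s.toList.foldl scoreItStep (0, 0, [])).1

-- ===== PORT B =====
-- inner while = takeWhile/dropWhile on the remaining characters; "if j < n" = the
-- dropped remainder being nonempty
def scoreItAltGo (l : List Char) (depth result : Int) : Int :=
  match h : l with
  | [] => result
  | c :: rest =>
    if hdg : PySem.Chars.isdigit c then
      let run := (c :: rest).takeWhile PySem.Chars.isdigit
      let rest' := (c :: rest).dropWhile PySem.Chars.isdigit
      match rest' with
      | [] => result
      | _ :: _ => scoreItAltGo rest' depth (result + depth * (PySem.Int.ofChars? run).getD 0)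
    else
      scoreItAltGo rest (if c = '(' then depth + 1 else if c = ')' then depth - 1 else depth) result
termination_by l.length
decreasing_by
  · simp only [List.dropWhile_cons, hdg, if_pos]
    exact Nat.lt_succ_of_le (List.length_dropWhile_le _ _)
  · simp

def score_it_alt (s : String) : Int :=
  scoreItAltGo s.toList 0 0

-- ===== PRECONDITION & SPEC =====
def Spec_score_it (s : String) (out : Int) : Prop := out = score_it_alt s
instance (s : String) (out : Int) : Decidable (Spec_score_it s out) := by unfold Spec_score_it; infer_instance

-- ===== CLAIM (what is proved, stated in full; the proofs are below) =====
def Claim_equal_score_it : Prop := ∀ (s : String), Dom_score_it s → Spec_score_it s (score_it s)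

-- ===== LEMMAS AND PROOFS =====

-- folding A's step over a digit run only appends the run to `number`
theorem foldA_digits (ds : List Char) (hds : ∀ d ∈ ds, PySem.Chars.isdigit d = true) :
    ∀ (rest : List Char) (r p : Int) (num : List Char),
      (ds ++ rest).foldl scoreItStep (r, p, num) = rest.foldl scoreItStep (r, p, num ++ ds) := by
  induction ds with
  | nil => intro rest r p num; simp
  | cons d ds ih =>
    intro rest r p num
    have hd : PySem.Chars.isdigit d = true := hds d (by simp)
    have h1 : d ≠ '(' := by intro h; subst h; simp [PySem.Chars.isdigit] at hd
    have h2 : d ≠ ')' := by intro h; subst h; simp [PySem.Chars.isdigit] at hd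
    have : scoreItStep (r, p, num) d = (r, p, num ++ [d]) := by
      simp [scoreItStep, hd, h1, h2]
    simp only [List.cons_append, List.foldl_cons, this]
    rw [ih (fun d hd' => hds d (by simp [hd'])) rest r p (num ++ [d])]
    simp

theorem head_dropWhile_not {p : Char → Bool} {l : List Char} {c : Char} {rest : List Char}
    (h : l.dropWhile p = c :: rest) : p c = false := by
  have := List.head?_dropWhile_not p l
  rw [h] at this
  simpa using this

-- main induction: A's fold with empty pending accumulator equals B's run-based scan
theorem foldA_eq_altGo : ∀ (n : Nat) (l : List Char), l.length ≤ n → ∀ (p r : Int),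
    (l.foldl scoreItStep (r, p, [])).1 = scoreItAltGo l p r := by
  intro n
  induction n with
  | zero =>
    intro l hl p r
    have : l = [] := List.eq_nil_of_length_eq_zero (Nat.le_zero.mp hl)
    subst this; simp [scoreItAltGo]
  | succ n ih =>
    intro l hl p r
    match l with
    | [] => simp [scoreItAltGo]
    | c :: rest =>
      by_cases hc : PySem.Chars.isdigit c = true
      · -- digit run
        have hall : ∀ d ∈ (c :: rest).takeWhile PySem.Chars.isdigit,
            PySem.Chars.isdigit d = true := fun d hd => List.mem_takeWhile_imp hd
        have hdsne : (c :: rest).takeWhile PySem.Chars.isdigit ≠ [] := by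
          simp [hc]
        have hfold : (c :: rest).foldl scoreItStep (r, p, ([] : List Char)) =
            ((c :: rest).dropWhile PySem.Chars.isdigit).foldl scoreItStep
              (r, p, (c :: rest).takeWhile PySem.Chars.isdigit) := by
          conv_lhs => rw [← List.takeWhile_append_dropWhile
            (p := PySem.Chars.isdigit) (l := c :: rest)]
          rw [foldA_digits _ hall _ r p []]
          simp
        cases hdw : (c :: rest).dropWhile PySem.Chars.isdigit with
        | nil =>
          rw [hfold, hdw]
          rw [scoreItAltGo]
          simp [hc, hdw]
        | cons c' rest'' =>
          have hc' : PySem.Chars.isdigit c' = false := head_dropWhile_not hdw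
          have hstep : scoreItStep (r, p, (c :: rest).takeWhile PySem.Chars.isdigit) c' =
              (r + p * (PySem.Int.ofChars? ((c :: rest).takeWhile PySem.Chars.isdigit)).getD 0,
               p + ((if c' = '(' then (1:Int) else 0) - (if c' = ')' then (1:Int) else 0)),
               []) := by
            simp [scoreItStep, hc', hdsne]
          rw [hfold, hdw, List.foldl_cons, hstep]
          have hlen'' : rest''.length ≤ n := by
            have h1 : ((c :: rest).dropWhile PySem.Chars.isdigit).length ≤ rest.length := by
              simp only [List.dropWhile_cons, hc, if_pos]
              exact List.length_dropWhile_le _ _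
            rw [hdw] at h1
            simp at h1
            simp at hl
            omega
          rw [ih rest'' hlen'']
          rw [scoreItAltGo]
          simp only [hc, dite_true, hdw]
          have hδ : p + ((if c' = '(' then (1:Int) else 0) - (if c' = ')' then (1:Int) else 0)) =
              (if c' = '(' then p + 1 else if c' = ')' then p - 1 else p) := by
            by_cases h1 : c' = '(' <;> by_cases h2 : c' = ')' <;> simp_all <;> ring
          rw [scoreItAltGo]
          simp [hc', hδ]
      · -- non-digit
        have h := hc
        rw [Bool.not_eq_true] at h
        have hstep : scoreItStep (r, p, ([] : List Char)) c =
            (r, p + ((if c = '(' then (1:Int) else 0) - (if c = ')' then (1:Int) else 0)), []) := by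
          simp [scoreItStep, h]
        rw [List.foldl_cons, hstep]
        have hlen : rest.length ≤ n := by simpa using hl
        rw [ih rest hlen]
        rw [scoreItAltGo]
        have hδ : p + ((if c = '(' then (1:Int) else 0) - (if c = ')' then (1:Int) else 0)) =
            (if c = '(' then p + 1 else if c = ')' then p - 1 else p) := by
          by_cases h1 : c = '(' <;> by_cases h2 : c = ')' <;> simp_all <;> ring
        rw [hδ]
        simp [h]

-- ===== VERDICT (by name: the statement is the Claim_ definition above) =====
theorem score_it_spec : Claim_equal_score_it := by
  intro s _
  unfold Spec_score_it score_it score_it_alt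
  exact foldA_eq_altGo s.toList.length s.toList le_rfl 0 0
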